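-- pv_equiv track=rewrite | github.com/selfreferencing/erdos-86-lean | scan_max_witness.py | find_min_witness
-- ===== SOURCE A (Python) =====
-- from math import gcd
--
-- K_COMPLETE = [0, 1, 2, 3, 4, 5, 6, 7, 9, 11, 13, 14, 16, 17, 19, 21, 23, 25, 26, 29, 31, 39, 41]
--
-- def factor(n):
--     if n <= 1:
--         return []
--     factors = []
--     d = 2
--     while d * d <= n:
--         if n % d == 0:
--             e = 0
--             while n % d == 0:
--                 e += 1
--                 n //= d
--             factors.append((d, e))
--         d += 1 if d == 2 else 2
--     if n > 1:
--         factors.append((n, 1))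
--     return factors
--
-- def divisors_of_square(n):
--     facts = factor(n)
--     divs = [1]
--     for p, e in facts:
--         new_divs = []
--         for d in divs:
--             power = 1
--             for i in range(2*e + 1):
--                 new_divs.append(d * power)
--                 power *= p
--         divs = new_divs
--     return sorted(divs)
--
-- def find_min_witness(p):
--     min_d = float('inf')
--     best_k = None
--
--     for k in K_COMPLETE:
--         m_k = 4 * k + 3
--         if (p + m_k) % 4 != 0:
--             continue
--         x_k = (p + m_k) // 4
--         if gcd(x_k, m_k) > 1:
--             continue
--         target = (-x_k) % m_k
--         divs = divisors_of_square(x_k)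
--         for d in divs:
--             if d % m_k == target and d < min_d:
--                 min_d = d
--                 best_k = k
--                 break
--
--     return (min_d, best_k) if min_d < float('inf') else (None, None)
-- ===== SOURCE B (Python) =====
-- from math import gcd
--
-- K_COMPLETE = [0, 1, 2, 3, 4, 5, 6, 7, 9, 11, 13, 14, 16, 17, 19, 21, 23, 25, 26, 29, 31, 39, 41]
--
-- def factor(n):
--     if n <= 1:
--         return []
--     factors = []
--     d = 2
--     while d * d <= n:
--         if n % d == 0:
--             e = 0
--             while n % d == 0:
--                 e += 1
--                 n //= d
--             factors.append((d, e))
--         d += 1 if d == 2 else 2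
--     if n > 1:
--         factors.append((n, 1))
--     return factors
--
-- def _min_congruent_divisor(x, m):
--     # Smallest divisor of x^2 congruent to -x mod m, WITHOUT materialising the
--     # divisor list: dynamic programming over residue classes mod m.  best[r] is
--     # the smallest divisor (built from the primes processed so far) with
--     # residue r; multiplying by a nonnegative power of p is monotone, so the
--     # per-class minimum is a safe representative.
--     best = {1: 1}
--     for p, e in factor(x):
--         nxt = {}
--         for r, v in best.items():
--             c = v
--             for _ in range(2 * e + 1):
--                 rr = c % m
--                 if rr not in nxt or c < nxt[rr]:
--                     nxt[rr] = c
--                 c *= p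
--         best = nxt
--     return best.get((-x) % m)
--
-- def find_min_witness(p):
--     best = (None, None)
--     for k in K_COMPLETE:
--         m_k = 4 * k + 3
--         if (p + m_k) % 4 != 0:
--             continue
--         x_k = (p + m_k) // 4
--         if gcd(x_k, m_k) > 1:
--             continue
--         d = _min_congruent_divisor(x_k, m_k)
--         if d is not None and (best[0] is None or d < best[0]):
--             best = (d, k)
--     return best
-- ===== Notes on version B (the rewrite author's own statement) =====
-- stated objective: alternative
-- what changed: B never materialises the divisor list of x_k^2: instead of generating all divisors, sorting them and breaking at the first congruent one, B runs a dynamic program over residue classes mod m_k (a dict best[r] = smallest product with residue r, updated prime by prime), and reads the answer off at residue (-x_k) % m_k; correct because multiplying by a nonnegative prime power is monotone, so the per-residue minimum is a safe representative.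
import Mathlib
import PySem

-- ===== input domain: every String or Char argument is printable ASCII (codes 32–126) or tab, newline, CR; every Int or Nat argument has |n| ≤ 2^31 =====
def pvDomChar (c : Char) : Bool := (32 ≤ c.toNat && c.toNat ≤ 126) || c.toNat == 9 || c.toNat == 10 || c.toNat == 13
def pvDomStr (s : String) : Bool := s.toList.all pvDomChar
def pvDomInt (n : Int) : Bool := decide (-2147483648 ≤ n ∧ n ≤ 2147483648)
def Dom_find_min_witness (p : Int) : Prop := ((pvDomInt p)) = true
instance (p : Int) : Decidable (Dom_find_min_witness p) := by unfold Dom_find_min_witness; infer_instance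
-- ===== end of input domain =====

-- B replaces A's "enumerate all divisors of x_k², sort, first congruent hit" by a
-- dynamic program over residue classes mod m_k (a dict residue → smallest product,
-- updated prime by prime); no divisor list is ever built (objective: alternative).

-- ===== PORT A =====

def K_COMPLETE : List Int :=
  [0, 1, 2, 3, 4, 5, 6, 7, 9, 11, 13, 14, 16, 17, 19, 21, 23, 25, 26, 29, 31, 39, 41]

-- inner 'while n % d == 0: e += 1; n //= d' (fuel only makes it total; never exhausted on reachable calls)
def stripFactor (fuel : Nat) (n d e : Int) : Int × Int :=
  match fuel with
  | 0 => (n, e)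
  | f + 1 =>
    if PySem.Int.mod n d == 0 then stripFactor f (PySem.Int.floordiv n d) d (e + 1)
    else (n, e)

-- outer 'while d * d <= n' trial-division loop of factor (fuel only makes it total)
def factorAux (fuel : Nat) (n d : Int) (acc : List (Int × Int)) : List (Int × Int) :=
  match fuel with
  | 0 => acc
  | f + 1 =>
    if d * d ≤ n then
      if PySem.Int.mod n d == 0 then
        let r := stripFactor (n.toNat + 1) n d 0
        factorAux f r.1 (d + (if d == 2 then 1 else 2)) (acc ++ [(d, r.2)])
      else factorAux f n (d + (if d == 2 then 1 else 2)) acc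
    else if n > 1 then acc ++ [(n, 1)] else acc

def factor (n : Int) : List (Int × Int) :=
  if n ≤ 1 then [] else factorAux (n.toNat + 1) n 2 []

def divisors_of_square (n : Int) : List Int :=
  PySem.List.sorted
    ((factor n).foldl
      (fun divs pe =>
        divs.foldl
          (fun new_divs d =>
            ((PySem.List.pyRange 0 (2 * pe.2 + 1) 1).foldl
              (fun (st : List Int × Int) _i => (st.1 ++ [d * st.2], st.2 * pe.1))
              (new_divs, 1)).1)
          [])
      [1])
    (fun x => x) false

-- 'for d in divs: if d % m_k == target and d < min_d: …; break' (min_d = none plays float('inf'))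
def scanA (divs : List Int) (m_k target k : Int) (st : Option Int × Option Int) :
    Option Int × Option Int :=
  match divs with
  | [] => st
  | d :: rest =>
    if PySem.Int.mod d m_k == target
        && (match st.1 with | none => true | some md => decide (d < md)) then
      (some d, some k)
    else scanA rest m_k target k st

-- body of A's 'for k in K_COMPLETE' loop
def stepA (p : Int) (st : Option Int × Option Int) (k : Int) : Option Int × Option Int :=
  let m_k := 4 * k + 3
  if PySem.Int.mod (p + m_k) 4 != 0 then st
  else
    let x_k := PySem.Int.floordiv (p + m_k) 4
    if (Int.gcd x_k m_k : Int) > 1 then st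
    else
      let target := PySem.Int.mod (-x_k) m_k
      scanA (divisors_of_square x_k) m_k target k st

def find_min_witness (p : Int) : Option Int × Option Int :=
  let st := K_COMPLETE.foldl (stepA p) (none, none)
  match st.1 with
  | some m => (some m, st.2)
  | none => (none, none)

-- ===== PORT B =====

-- body of Source B's 'for _ in range(2*e+1)' loop: state (nxt, c);
-- 'rr = c % m; if rr not in nxt or c < nxt[rr]: nxt[rr] = c; c *= p'
def dpInner (m p : Int) (st : PySem.Dict Int Int × Int) (_i : Int) :
    PySem.Dict Int Int × Int :=
  let rr := PySem.Int.mod st.2 m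
  ((match st.1.get? rr with
    | none => st.1.insert rr st.2
    | some cur => if st.2 < cur then st.1.insert rr st.2 else st.1), st.2 * p)

-- 'nxt = {}; for r, v in best.items(): c = v; for _ in range(2*e+1): …; best = nxt'
def dpStep (m : Int) (best : PySem.Dict Int Int) (pe : Int × Int) : PySem.Dict Int Int :=
  best.items.foldl
    (fun nxt rv =>
      ((PySem.List.pyRange 0 (2 * pe.2 + 1) 1).foldl (dpInner m pe.1) (nxt, rv.2)).1)
    PySem.Dict.empty

-- _min_congruent_divisor: DP over residues mod m, then best.get((-x) % m)
def minCongruentDivisor (x m : Int) : Option Int :=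
  ((factor x).foldl (dpStep m) (PySem.Dict.empty.insert 1 1)).get? (PySem.Int.mod (-x) m)

-- body of B's 'for k in K_COMPLETE' loop
def stepB (p : Int) (best : Option Int × Option Int) (k : Int) : Option Int × Option Int :=
  let m_k := 4 * k + 3
  if PySem.Int.mod (p + m_k) 4 != 0 then best
  else
    let x_k := PySem.Int.floordiv (p + m_k) 4
    if (Int.gcd x_k m_k : Int) > 1 then best
    else
      match minCongruentDivisor x_k m_k with
      | none => best
      | some d =>
        match best.1 with
        | none => (some d, some k)
        | some b0 => if d < b0 then (some d, some k) else best

def find_min_witness_alt (p : Int) : Option Int × Option Int :=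
  K_COMPLETE.foldl (stepB p) (none, none)

-- ===== PRECONDITION & SPEC =====
def Spec_find_min_witness (p : Int) (out : Option Int × Option Int) : Prop := out = find_min_witness_alt p
instance (p : Int) (out : Option Int × Option Int) : Decidable (Spec_find_min_witness p out) := by unfold Spec_find_min_witness; infer_instance

-- ===== CLAIM (what is proved, stated in full; the proofs are below) =====
def Claim_equal_find_min_witness : Prop := ∀ (p : Int), Dom_find_min_witness p → Spec_find_min_witness p (find_min_witness p)

-- ===== LEMMAS AND PROOFS =====

-- running-minimum step (proof-level view of both A's scan and B's dict update)
def optMin (acc : Option Int) (d : Int) : Option Int :=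
  match acc with
  | none => some d
  | some mv => some (min mv d)

-- the unsorted divisor list of n² that A builds before sorting (proof-only)
def cand (p : Int) (n : Nat) (v : Int) : List Int :=
  (List.range n).map (fun i => v * p ^ i)

def sqDivisors (n : Int) : List Int :=
  (factor n).foldl
    (fun divs pe =>
      divs.flatMap (fun d => cand pe.1 (PySem.List.pyRange 0 (2 * pe.2 + 1) 1).length d))
    [1]

-- minimum of the residue-r divisors of l (proof-only)
def mfil (m r : Int) (l : List Int) : Option Int :=
  (l.filter (fun d => PySem.Int.mod d m == r)).foldl optMin none

-- the dict update of dpInner as a standalone function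
def relaxc (m : Int) (d : PySem.Dict Int Int) (c : Int) : PySem.Dict Int Int :=
  match d.get? (PySem.Int.mod c m) with
  | none => d.insert (PySem.Int.mod c m) c
  | some cur => if c < cur then d.insert (PySem.Int.mod c m) c else d

theorem optmin_some (l : List Int) (a : Int) :
    l.foldl optMin (some a) = some (l.foldl min a) := by
  induction l generalizing a with
  | nil => rfl
  | cons x xs ih => exact ih (min a x)

theorem foldl_min_mem (l : List Int) (a : Int) : l.foldl min a ∈ a :: l := by
  induction l generalizing a with
  | nil => simp
  | cons x xs ih =>
    show List.foldl min (min a x) xs ∈ a :: x :: xs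
    have h := ih (min a x)
    rcases List.mem_cons.1 h with h1 | h1
    · rw [h1]
      rcases min_choice a x with hm | hm <;> rw [hm] <;> simp
    · exact List.mem_cons_of_mem _ (List.mem_cons_of_mem _ h1)

theorem foldl_min_le (l : List Int) (a : Int) : ∀ x ∈ a :: l, l.foldl min a ≤ x := by
  induction l generalizing a with
  | nil => intro x hx; simp at hx; simp [hx]
  | cons b bs ih =>
    intro x hx
    have h := ih (min a b)
    rcases List.mem_cons.1 hx with h1 | h1
    · subst h1
      exact le_trans (h _ (List.mem_cons_self ..)) (min_le_left x b)
    · rcases List.mem_cons.1 h1 with h2 | h2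
      · subst h2
        exact le_trans (h _ (List.mem_cons_self ..)) (min_le_right a x)
      · exact h x (by simp [h2])

theorem foldl_min_of_le (l : List Int) (a : Int) (h : ∀ x ∈ l, a ≤ x) :
    l.foldl min a = a := by
  induction l with
  | nil => rfl
  | cons x xs ih =>
    show List.foldl min (min a x) xs = a
    rw [min_eq_left (h x (by simp))]
    exact ih (fun y hy => h y (by simp [hy]))

theorem minfold_mem {l : List Int} {v : Int} (h : l.foldl optMin none = some v) :
    v ∈ l := by
  cases l with
  | nil => simp [List.foldl] at h
  | cons x xs =>
    have h2 : xs.foldl optMin (some x) = some v := h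
    rw [optmin_some] at h2
    have h3 := Option.some.inj h2
    rw [← h3]
    exact foldl_min_mem xs x

theorem minfold_le {l : List Int} {v : Int} (h : l.foldl optMin none = some v) :
    ∀ x ∈ l, v ≤ x := by
  cases l with
  | nil => simp [List.foldl] at h
  | cons x xs =>
    have h2 : xs.foldl optMin (some x) = some v := h
    rw [optmin_some] at h2
    have h3 := Option.some.inj h2
    rw [← h3]
    intro y hy
    exact foldl_min_le xs x y hy

theorem minfold_cons (x : Int) (xs : List Int) :
    (x :: xs).foldl optMin none = some (xs.foldl min x) := optmin_some xs x

theorem optMin_rcomm : RightCommutative optMin := by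
  constructor
  intro b a₁ a₂
  cases b with
  | none => exact congrArg some (min_comm a₁ a₂)
  | some mv => exact congrArg some (min_right_comm mv a₁ a₂)

-- two candidate lists with mutual domination have the same optional minimum
theorem minfold_eq_of_cofinal (l₁ l₂ : List Int)
    (h1 : ∀ a ∈ l₁, a ∈ l₂) (h2 : ∀ b ∈ l₂, ∃ a ∈ l₁, a ≤ b) :
    l₁.foldl optMin none = l₂.foldl optMin none := by
  cases l₁ with
  | nil =>
    cases l₂ with
    | nil => rfl
    | cons y ys =>
      obtain ⟨a, ha, _⟩ := h2 y (by simp)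
      exact absurd ha (by simp)
  | cons x xs =>
    rw [minfold_cons]
    cases l₂ with
    | nil => exact absurd (h1 x (by simp)) (by simp)
    | cons y ys =>
      rw [minfold_cons]
      have hv1 := foldl_min_mem xs x
      have hv2 := foldl_min_mem ys y
      have hle1 := foldl_min_le xs x
      have hle2 := foldl_min_le ys y
      congr 1
      have hA : ys.foldl min y ≤ xs.foldl min x := hle2 _ (h1 _ hv1)
      obtain ⟨a, ha, haw⟩ := h2 (ys.foldl min y) hv2
      have hB : xs.foldl min x ≤ ys.foldl min y := le_trans (hle1 a ha) haw
      omega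

theorem get?_relaxc (m : Int) (d : PySem.Dict Int Int) (c r : Int) :
    (relaxc m d c).get? r =
      if PySem.Int.mod c m = r then optMin (d.get? r) c else d.get? r := by
  unfold relaxc
  cases hg : d.get? (PySem.Int.mod c m) with
  | none =>
    rw [PySem.Dict.get?_insert]
    by_cases hr : PySem.Int.mod c m = r
    · subst hr; simp [hg, optMin]
    · have hr' : ¬(r = PySem.Int.mod c m) := fun h => hr h.symm
      simp [hr, hr']
  | some cur =>
    show (if c < cur then d.insert (PySem.Int.mod c m) c else d).get? r = _
    by_cases hc : c < cur
    · rw [if_pos hc, PySem.Dict.get?_insert]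
      by_cases hr : PySem.Int.mod c m = r
      · subst hr; simp [hg, optMin, min_eq_right (le_of_lt hc)]
      · have hr' : ¬(r = PySem.Int.mod c m) := fun h => hr h.symm
        simp [hr, hr']
    · rw [if_neg hc]
      by_cases hr : PySem.Int.mod c m = r
      · subst hr; simp [hg, optMin, min_eq_left (not_lt.1 hc)]
      · simp [hr]

theorem get?_foldl_relaxc (m : Int) (cs : List Int) (d : PySem.Dict Int Int) (r : Int) :
    ((cs.foldl (relaxc m) d).get? r) =
      (cs.filter (fun c => PySem.Int.mod c m == r)).foldl optMin (d.get? r) := by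
  induction cs generalizing d with
  | nil => rfl
  | cons c cs ih =>
    show ((cs.foldl (relaxc m) (relaxc m d c)).get? r) = _
    rw [ih]
    by_cases hc : PySem.Int.mod c m = r
    · have : (c :: cs).filter (fun c => PySem.Int.mod c m == r)
          = c :: cs.filter (fun c => PySem.Int.mod c m == r) := by simp [hc]
      rw [this]
      show _ = (cs.filter _).foldl optMin (optMin (d.get? r) c)
      rw [get?_relaxc, if_pos hc]
    · have : (c :: cs).filter (fun c => PySem.Int.mod c m == r)
          = cs.filter (fun c => PySem.Int.mod c m == r) := by simp [hc]
      rw [this, get?_relaxc, if_neg hc]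

theorem nodup_keys_relaxc (m : Int) (d : PySem.Dict Int Int) (c : Int)
    (h : d.keys.Nodup) : (relaxc m d c).keys.Nodup := by
  unfold relaxc
  cases d.get? (PySem.Int.mod c m) with
  | none => exact PySem.Dict.nodup_keys_insert _ _ _ h
  | some cur =>
    by_cases hc : c < cur
    · simp only [hc, if_true]
      exact PySem.Dict.nodup_keys_insert _ _ _ h
    · simpa [hc] using h

theorem nodup_keys_foldl_relaxc (m : Int) (cs : List Int) (d : PySem.Dict Int Int)
    (h : d.keys.Nodup) : (cs.foldl (relaxc m) d).keys.Nodup := by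
  induction cs generalizing d with
  | nil => exact h
  | cons c cs ih => exact ih _ (nodup_keys_relaxc m d c h)

-- the inner (dict, c) fold is the relaxc-fold over the explicit power list
theorem dp_inner_fold (m p : Int) (l : List Int) (d : PySem.Dict Int Int) (v : Int) :
    l.foldl (dpInner m p) (d, v)
      = ((cand p l.length v).foldl (relaxc m) d, v * p ^ l.length) := by
  induction l generalizing d v with
  | nil => simp [cand]
  | cons a tl ih =>
    show tl.foldl (dpInner m p) (relaxc m d v, v * p) = _
    rw [ih]
    have hc : cand p (tl.length + 1) v = v :: cand p tl.length (v * p) := by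
      unfold cand
      rw [List.range_succ_eq_map, List.map_cons]
      simp only [pow_zero, mul_one, List.map_map]
      congr 1
      apply List.map_congr_left
      intro i _
      simp only [Function.comp_apply, pow_succ]
      ring
    rw [List.length_cons, hc]
    simp only [List.foldl_cons, Prod.mk.injEq]
    exact ⟨by trivial, by rw [pow_succ]; ring⟩

-- folding per-item relaxc-folds equals one relaxc-fold over the concatenation
theorem foldl_foldl_flat {β : Type} (m : Int) (g : β → List Int) (l : List β)
    (d : PySem.Dict Int Int) :
    l.foldl (fun d b => (g b).foldl (relaxc m) d) d
      = (l.flatMap g).foldl (relaxc m) d := by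
  induction l generalizing d with
  | nil => rfl
  | cons b bs ih =>
    show bs.foldl _ ((g b).foldl (relaxc m) d) = _
    rw [ih, List.flatMap_cons, List.foldl_append]

theorem dpStep_eq_flat (m : Int) (T : PySem.Dict Int Int) (pe : Int × Int) :
    dpStep m T pe
      = (T.items.flatMap
          (fun rv => cand pe.1 (PySem.List.pyRange 0 (2 * pe.2 + 1) 1).length rv.2)).foldl
          (relaxc m) PySem.Dict.empty := by
  unfold dpStep
  rw [← foldl_foldl_flat]
  apply PySem.List.foldl_congr_mem
  intro nxt rv _
  rw [dp_inner_fold]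

-- key invariant step: one prime's DP pass tracks one flatMap pass of the divisor list
theorem dp_step_correct (m pp e : Int) (T : PySem.Dict Int Int) (divs : List Int)
    (hm : 0 < m) (hp : 0 ≤ pp) (hnd : T.keys.Nodup)
    (hT : ∀ r, T.get? r = mfil m r divs) (r : Int) :
    (dpStep m T (pp, e)).get? r
      = mfil m r (divs.flatMap
          (fun dd => cand pp (PySem.List.pyRange 0 (2 * e + 1) 1).length dd)) := by
  set N := (PySem.List.pyRange 0 (2 * e + 1) 1).length with hN
  rw [dpStep_eq_flat, get?_foldl_relaxc, PySem.Dict.get?_empty]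
  unfold mfil
  apply minfold_eq_of_cofinal
  · intro a ha
    rw [List.mem_filter] at ha ⊢
    obtain ⟨haC, hpred⟩ := ha
    refine ⟨?_, hpred⟩
    rw [List.mem_flatMap] at haC ⊢
    obtain ⟨rv, hrv, hacand⟩ := haC
    have hget : T.get? rv.1 = some rv.2 := PySem.Dict.get?_of_mem_items _ hrv hnd
    rw [hT] at hget
    have hv := minfold_mem hget
    exact ⟨rv.2, List.mem_of_mem_filter hv, hacand⟩
  · intro b hb
    rw [List.mem_filter] at hb
    obtain ⟨hbN, hbpred⟩ := hb
    rw [List.mem_flatMap] at hbN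
    obtain ⟨dd, hdd, hbc⟩ := hbN
    unfold cand at hbc
    rw [List.mem_map] at hbc
    obtain ⟨i, hi, hbeq⟩ := hbc
    have hdd' : dd ∈ divs.filter (fun c => PySem.Int.mod c m == PySem.Int.mod dd m) := by
      rw [List.mem_filter]
      exact ⟨hdd, by simp⟩
    have hne : mfil m (PySem.Int.mod dd m) divs ≠ none := by
      unfold mfil
      cases hfl : divs.filter (fun c => PySem.Int.mod c m == PySem.Int.mod dd m) with
      | nil => rw [hfl] at hdd'; simp at hdd'
      | cons z zs => rw [minfold_cons]; simp
    obtain ⟨v, hv⟩ := Option.ne_none_iff_exists'.1 hne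
    have hvmem := minfold_mem hv
    rw [List.mem_filter] at hvmem
    obtain ⟨hvdivs, hvres⟩ := hvmem
    have hvle : v ≤ dd := minfold_le hv dd hdd'
    have hgv : T.get? (PySem.Int.mod dd m) = some v := by rw [hT]; exact hv
    have hitems := PySem.Dict.mem_items_of_get?_eq_some _ hgv
    refine ⟨v * pp ^ i, ?_, ?_⟩
    · rw [List.mem_filter]
      constructor
      · rw [List.mem_flatMap]
        refine ⟨(PySem.Int.mod dd m, v), hitems, ?_⟩
        unfold cand
        rw [List.mem_map]
        exact ⟨i, hi, rfl⟩
      · -- same residue as b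
        have hres : PySem.Int.mod (v * pp ^ i) m = PySem.Int.mod (dd * pp ^ i) m := by
          rw [PySem.Int.mod_eq_emod_of_pos hm, PySem.Int.mod_eq_emod_of_pos hm]
          rw [Int.mul_emod, Int.mul_emod dd]
          congr 2
          have := hvres
          rw [beq_iff_eq, PySem.Int.mod_eq_emod_of_pos hm,
            PySem.Int.mod_eq_emod_of_pos hm] at this
          exact this
        rw [← hbeq] at hbpred
        simpa [hres] using hbpred
    · rw [← hbeq]
      exact mul_le_mul_of_nonneg_right hvle (pow_nonneg hp i)

-- the whole DP fold tracks the whole divisor-list fold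
theorem dp_fold_correct (m : Int) (hm : 0 < m) (F : List (Int × Int))
    (hF : ∀ q ∈ F, 0 ≤ q.1) :
    ∀ (T : PySem.Dict Int Int) (divs : List Int), T.keys.Nodup →
      (∀ r, T.get? r = mfil m r divs) →
      ∀ r, (F.foldl (dpStep m) T).get? r
        = mfil m r (F.foldl
            (fun ds pe => ds.flatMap
              (fun dd => cand pe.1 (PySem.List.pyRange 0 (2 * pe.2 + 1) 1).length dd))
            divs) := by
  induction F with
  | nil => intro T divs _ hT r; exact hT r
  | cons pe F ih =>
    intro T divs hnd hT r
    have hpe : 0 ≤ pe.1 := hF pe (by simp)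
    have hstep := dp_step_correct m pe.1 pe.2 T divs hm hpe hnd hT
    have hnd' : (dpStep m T pe).keys.Nodup := by
      rw [dpStep_eq_flat]
      exact nodup_keys_foldl_relaxc _ _ _ PySem.Dict.nodup_keys_empty
    exact ih (fun q hq => hF q (by simp [hq])) (dpStep m T pe) _ hnd'
      (fun r' => by simpa using hstep r') r

theorem base_table (m : Int) (hm : 2 ≤ m) (r : Int) :
    (PySem.Dict.empty.insert 1 1 : PySem.Dict Int Int).get? r = mfil m r [1] := by
  have h1 : PySem.Int.mod 1 m = 1 := by
    rw [PySem.Int.mod_eq_emod_of_pos (by omega)]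
    exact Int.emod_eq_of_lt (by omega) (by omega)
  unfold mfil
  by_cases hr : r = 1
  · subst hr
    simp [PySem.Dict.get?_insert_self, List.filter, h1, List.foldl, optMin]
  · rw [PySem.Dict.get?_insert_of_ne _ _ hr, PySem.Dict.get?_empty]
    have h2 : ((1:Int) == r) = false := by simpa using Ne.symm hr
    simp [List.filter, h1, h2]

theorem factorAux_fst_nonneg (fuel : Nat) :
    ∀ (n d : Int) (acc : List (Int × Int)), 2 ≤ d → (∀ q ∈ acc, 0 ≤ q.1) →
      ∀ q ∈ factorAux fuel n d acc, 0 ≤ q.1 := by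
  induction fuel with
  | zero => intro n d acc _ hacc q hq; exact hacc q hq
  | succ f ih =>
    intro n d acc hd hacc q hq
    unfold factorAux at hq
    by_cases h1 : d * d ≤ n
    · rw [if_pos h1] at hq
      by_cases h2 : (PySem.Int.mod n d == 0) = true
      · rw [if_pos h2] at hq
        refine ih _ _ _ (by split <;> omega) ?_ q hq
        intro q2 hq2
        rcases List.mem_append.1 hq2 with h | h
        · exact hacc q2 h
        · simp only [List.mem_singleton] at h
          subst h
          show (0:Int) ≤ d
          omega
      · rw [if_neg h2] at hq
        exact ih _ _ _ (by split <;> omega) hacc q hq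
    · rw [if_neg h1] at hq
      by_cases h3 : n > 1
      · rw [if_pos h3] at hq
        rcases List.mem_append.1 hq with h | h
        · exact hacc q h
        · simp only [List.mem_singleton] at h
          subst h
          show (0:Int) ≤ n
          omega
      · rw [if_neg h3] at hq
        exact hacc q hq

theorem factor_fst_nonneg (n : Int) : ∀ q ∈ factor n, 0 ≤ q.1 := by
  unfold factor
  by_cases h : n ≤ 1
  · simp [h]
  · rw [if_neg h]
    exact factorAux_fst_nonneg _ n 2 [] (by omega) (by simp)

-- B's DP computes the minimum congruent divisor of A's unsorted divisor list
theorem dp_eq_mfil (x m : Int) (hm : 2 ≤ m) (t : Int) :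
    ((factor x).foldl (dpStep m) (PySem.Dict.empty.insert 1 1)).get? t
      = mfil m t (sqDivisors x) := by
  have hnd : ((PySem.Dict.empty.insert 1 1 : PySem.Dict Int Int)).keys.Nodup :=
    PySem.Dict.nodup_keys_insert PySem.Dict.empty 1 1 PySem.Dict.nodup_keys_empty
  exact dp_fold_correct m (by omega) (factor x) (factor_fst_nonneg x) _ [1]
    hnd (base_table m hm) t

-- ===== A-side: sorted divisor list = sorted sqDivisors =====

theorem pow_fold (d p : Int) (l : List Int) (nd : List Int) (pw : Int) :
    l.foldl (fun (st : List Int × Int) (_i : Int) => (st.1 ++ [d * st.2], st.2 * p)) (nd, pw)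
      = (nd ++ (List.range l.length).map (fun i => d * (pw * p ^ i)), pw * p ^ l.length) := by
  induction l generalizing nd pw with
  | nil => simp
  | cons a tl ih =>
    show tl.foldl _ (nd ++ [d * pw], pw * p) = _
    rw [ih]
    simp only [Prod.mk.injEq]
    constructor
    · rw [List.append_assoc, List.length_cons, List.range_succ_eq_map]
      simp only [List.map_cons, List.map_map, pow_zero, mul_one,
        List.cons_append, List.nil_append]
      congr 1
      congr 1
      apply List.map_congr_left
      intro i _
      simp only [Function.comp_apply, pow_succ]
      ring
    · rw [List.length_cons, pow_succ]
      ring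

theorem range_map_cand (d p : Int) (n : Nat) :
    (List.range n).map (fun i => d * (1 * p ^ i)) = cand p n d := by
  unfold cand
  apply List.map_congr_left
  intro i _
  ring

theorem inner_eq (pe : Int × Int) (divs : List Int) :
    divs.foldl
        (fun new_divs d =>
          ((PySem.List.pyRange 0 (2 * pe.2 + 1) 1).foldl
            (fun (st : List Int × Int) _i => (st.1 ++ [d * st.2], st.2 * pe.1))
            (new_divs, 1)).1)
        []
      = divs.flatMap
          (fun d => cand pe.1 (PySem.List.pyRange 0 (2 * pe.2 + 1) 1).length d) := by
  have hbody : (fun (new_divs : List Int) (d : Int) =>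
      ((PySem.List.pyRange 0 (2 * pe.2 + 1) 1).foldl
        (fun (st : List Int × Int) _i => (st.1 ++ [d * st.2], st.2 * pe.1))
        (new_divs, 1)).1)
      = fun new_divs d => new_divs ++
          cand pe.1 (PySem.List.pyRange 0 (2 * pe.2 + 1) 1).length d := by
    funext nd dd
    rw [pow_fold]
    show nd ++ _ = nd ++ _
    rw [range_map_cand]
  rw [hbody, PySem.List.foldl_append_eq_flatMap]
  simp

theorem divs_eq (n : Int) :
    divisors_of_square n = PySem.List.sorted (sqDivisors n) (fun x => x) false := by
  have hf : (fun (divs : List Int) (pe : Int × Int) =>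
      divs.foldl
        (fun new_divs d =>
          ((PySem.List.pyRange 0 (2 * pe.2 + 1) 1).foldl
            (fun (st : List Int × Int) _i => (st.1 ++ [d * st.2], st.2 * pe.1))
            (new_divs, 1)).1)
        [])
      = (fun (divs : List Int) (pe : Int × Int) =>
          divs.flatMap
            (fun d => cand pe.1 (PySem.List.pyRange 0 (2 * pe.2 + 1) 1).length d)) := by
    funext divs pe
    exact inner_eq pe divs
  unfold divisors_of_square sqDivisors
  rw [hf]

theorem scan_eq (m t k : Int) (S : List Int) (hp : S.Pairwise (· ≤ ·))
    (st : Option Int × Option Int) :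
    scanA S m t k st =
      match (S.filter (fun x => PySem.Int.mod x m == t)).foldl optMin none with
      | none => st
      | some d =>
        match st.1 with
        | none => (some d, some k)
        | some b0 => if d < b0 then (some d, some k) else st := by
  induction S generalizing st with
  | nil => rfl
  | cons d rest ih =>
    rw [List.pairwise_cons] at hp
    obtain ⟨hle, hp'⟩ := hp
    by_cases hP : (PySem.Int.mod d m == t) = true
    · have hfil : (d :: rest).filter (fun x => PySem.Int.mod x m == t)
          = d :: rest.filter (fun x => PySem.Int.mod x m == t) := by
        simp [hP]
      have hmin : ((d :: rest).filter (fun x => PySem.Int.mod x m == t)).foldl optMin none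
          = some d := by
        rw [hfil]
        have h1 : (rest.filter (fun x => PySem.Int.mod x m == t)).foldl optMin (some d)
            = some ((rest.filter (fun x => PySem.Int.mod x m == t)).foldl min d) :=
          optmin_some _ d
        have h2 : (rest.filter (fun x => PySem.Int.mod x m == t)).foldl min d = d :=
          foldl_min_of_le _ d (fun x hx => hle x (List.mem_of_mem_filter hx))
        calc (d :: rest.filter (fun x => PySem.Int.mod x m == t)).foldl optMin none
            = (rest.filter (fun x => PySem.Int.mod x m == t)).foldl optMin (some d) := rfl
          _ = some d := by rw [h1, h2]
      rw [hmin]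
      cases hst : st.1 with
      | none =>
        simp [scanA, hst, hP]
      | some b0 =>
        by_cases hd : d < b0
        · simp [scanA, hst, hP, hd]
        · have hclm : (match st.1 with | none => true | some md => decide (d < md)) = false := by
            rw [hst]
            simp [hd]
          have hlhs : scanA (d :: rest) m t k st = scanA rest m t k st := by
            simp only [scanA, hclm, Bool.and_false, Bool.false_eq_true, if_false]
          rw [hlhs, ih hp' st]
          cases hfr : (rest.filter (fun x => PySem.Int.mod x m == t)).foldl optMin none with
          | none => simp [hd]
          | some d' =>
            have hd'mem : d' ∈ rest.filter (fun x => PySem.Int.mod x m == t) := minfold_mem hfr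
            have hdd' : d ≤ d' := hle d' (List.mem_of_mem_filter hd'mem)
            have hnd' : ¬ d' < b0 := by
              have := not_lt.mp hd
              omega
            simp [hst, hnd', hd]
    · have hfil : (d :: rest).filter (fun x => PySem.Int.mod x m == t)
          = rest.filter (fun x => PySem.Int.mod x m == t) := by
        simp [hP]
      rw [hfil, ← ih hp' st]
      simp only [scanA, hP, Bool.false_and, Bool.false_eq_true, if_false]

theorem step_eq (p : Int) (st : Option Int × Option Int) (k : Int) (hk : 0 ≤ k) :
    stepA p st k = stepB p st k := by
  unfold stepA stepB
  by_cases h1 : (PySem.Int.mod (p + (4 * k + 3)) 4 != 0) = true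
  · simp only [h1, if_true]
  · simp only [h1, Bool.false_eq_true, if_false]
    by_cases h2 : (Int.gcd (PySem.Int.floordiv (p + (4 * k + 3)) 4) (4 * k + 3) : Int) > 1
    · simp only [h2, if_true]
    · simp only [h2, if_false]
      rw [divs_eq]
      rw [scan_eq _ _ _ _ (PySem.List.sorted_pairwise _ _) st]
      have hperm : ((PySem.List.sorted (sqDivisors (PySem.Int.floordiv (p + (4 * k + 3)) 4))
            (fun x => x) false).filter
              (fun x => PySem.Int.mod x (4 * k + 3)
                == PySem.Int.mod (-(PySem.Int.floordiv (p + (4 * k + 3)) 4)) (4 * k + 3))).Perm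
          ((sqDivisors (PySem.Int.floordiv (p + (4 * k + 3)) 4)).filter
              (fun x => PySem.Int.mod x (4 * k + 3)
                == PySem.Int.mod (-(PySem.Int.floordiv (p + (4 * k + 3)) 4)) (4 * k + 3))) :=
        (PySem.List.sorted_perm _ _ _).filter _
      have hfold := @List.Perm.foldl_eq _ _ optMin _ _ optMin_rcomm hperm none
      rw [hfold]
      have hdp := dp_eq_mfil (PySem.Int.floordiv (p + (4 * k + 3)) 4) (4 * k + 3)
        (by omega) (PySem.Int.mod (-(PySem.Int.floordiv (p + (4 * k + 3)) 4)) (4 * k + 3))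
      show (match mfil (4 * k + 3)
              (PySem.Int.mod (-(PySem.Int.floordiv (p + (4 * k + 3)) 4)) (4 * k + 3))
              (sqDivisors (PySem.Int.floordiv (p + (4 * k + 3)) 4)) with
            | none => st
            | some d =>
              match st.1 with
              | none => (some d, some k)
              | some b0 => if d < b0 then (some d, some k) else st)
          = _
      rw [← hdp]
      rfl

theorem stepB_shape (p : Int) (st : Option Int × Option Int) (k : Int) :
    stepB p st k = st ∨ (stepB p st k).1.isSome := by
  obtain ⟨st1, st2⟩ := st
  unfold stepB
  by_cases h1 : (PySem.Int.mod (p + (4 * k + 3)) 4 != 0) = true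
  · simp only [h1, if_true]
    exact Or.inl trivial
  · simp only [h1, Bool.false_eq_true, if_false]
    by_cases h2 : (Int.gcd (PySem.Int.floordiv (p + (4 * k + 3)) 4) (4 * k + 3) : Int) > 1
    · simp only [h2, if_true]
      exact Or.inl trivial
    · simp only [h2, if_false]
      cases hmc : minCongruentDivisor (PySem.Int.floordiv (p + (4 * k + 3)) 4) (4 * k + 3) with
      | none => exact Or.inl rfl
      | some dd =>
        cases st1 with
        | none => exact Or.inr rfl
        | some b0 =>
          by_cases hd : dd < b0
          · simp [hd]
          · simp [hd]

theorem foldB_inv (p : Int) (l : List Int) :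
    ∀ (st : Option Int × Option Int), (st.1 = none → st = (none, none)) →
      ((l.foldl (stepB p) st).1 = none → l.foldl (stepB p) st = (none, none)) := by
  induction l with
  | nil => intro st h; exact h
  | cons k ks ih =>
    intro st h
    apply ih
    intro hnone
    rcases stepB_shape p st k with hs | hs
    · rw [hs] at hnone ⊢
      exact h hnone
    · rw [hnone] at hs
      simp at hs

-- ===== VERDICT (by name: the statement is the Claim_ definition above) =====
theorem find_min_witness_spec : Claim_equal_find_min_witness := by
  intro p _
  show find_min_witness p = find_min_witness_alt p
  have hAB : K_COMPLETE.foldl (stepA p) ((none : Option Int), (none : Option Int))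
      = K_COMPLETE.foldl (stepB p) ((none : Option Int), (none : Option Int)) := by
    apply PySem.List.foldl_congr_mem
    intro st k hk
    exact step_eq p st k (by
      have : ∀ k ∈ K_COMPLETE, (0:Int) ≤ k := by decide
      exact this k hk)
  show (match (K_COMPLETE.foldl (stepA p) ((none : Option Int), (none : Option Int))).1 with
        | some m => (some m, (K_COMPLETE.foldl (stepA p) ((none : Option Int), (none : Option Int))).2)
        | none => ((none : Option Int), (none : Option Int)))
      = K_COMPLETE.foldl (stepB p) (none, none)
  rw [hAB]
  cases hr : (K_COMPLETE.foldl (stepB p) ((none : Option Int), (none : Option Int))).1 with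
  | some m =>
    have h2 : (some m, (K_COMPLETE.foldl (stepB p) ((none : Option Int), (none : Option Int))).2)
        = K_COMPLETE.foldl (stepB p) ((none : Option Int), (none : Option Int)) := by
      rw [← hr]
    exact h2
  | none =>
    have h0 := foldB_inv p K_COMPLETE ((none : Option Int), (none : Option Int)) (fun _ => rfl) hr
    exact h0.symm
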